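-- pv_equiv track=rewrite | github.com/Cielquan/dotfiles | bin/10_install_dotfiles.py | parse_install_list
-- ===== SOURCE A (Python) =====
-- from typing import Dict, List, Set
--
-- INSTALL_LIST_TYPE = Set[str]
--
-- INSTALL_LISTS = {
--     "bash": ["sh", "bash"],
--     "bin": ["bin"],
--     "cargo": ["cargo"],
--     "curl": ["curl"],
--     "git": ["git"],
--     "gpg": ["gpg"],
--     "less": ["less"],
--     "pdb": ["pdb"],
--     "pdbpp": ["pdbpp"],
--     "pip": ["pip"],
--     "poetry": ["poetry"],
--     "sh": ["sh"],
--     "starship": ["bash", "starship"],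
--     "wget": ["wget"],
--     "default": ["bash", "bin", "curl", "less", "wget"],
--     "prompt": ["starship"],
--     "coding": ["cargo", "git", "gpg", "pdb", "pdbpp", "pip", "poetry"],
-- }
--
-- def parse_install_list(list_to_install: List[str]) -> INSTALL_LIST_TYPE:
--     """Parse given list with install targets recursively."""
--     install_this = set()
--
--     def parse_target_recursive(target_to_install: str) -> None:
--         """Get given target from `install_lists` and parse it."""
--         target = INSTALL_LISTS.get(target_to_install)
--         if target is None:
--             return
--         if len(target) == 1:
--             install_this.add(target[0])
--         else:
--             for dependency in target:
--                 if dependency == target_to_install: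
--                     install_this.add(dependency)
--                 else:
--                     parse_target_recursive(dependency)
--
--     for target_to_install in list_to_install:
--         parse_target_recursive(target_to_install)
--
--     return install_this
-- ===== SOURCE B (Python) =====
-- INSTALL_LISTS = {
--     "bash": ["sh", "bash"],
--     "bin": ["bin"],
--     "cargo": ["cargo"],
--     "curl": ["curl"],
--     "git": ["git"],
--     "gpg": ["gpg"],
--     "less": ["less"],
--     "pdb": ["pdb"],
--     "pdbpp": ["pdbpp"],
--     "pip": ["pip"],
--     "poetry": ["poetry"],
--     "sh": ["sh"],
--     "starship": ["bash", "starship"],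
--     "wget": ["wget"],
--     "default": ["bash", "bin", "curl", "less", "wget"],
--     "prompt": ["starship"],
--     "coding": ["cargo", "git", "gpg", "pdb", "pdbpp", "pip", "poetry"],
-- }
--
--
-- def parse_install_list(list_to_install):
--     """Iterative worklist (explicit DFS stack) instead of nested recursion.
--
--     Stack items are tagged: ("add", name) adds name directly, ("target", name)
--     expands name via INSTALL_LISTS.  Dependencies are pushed in reverse so the
--     left-to-right visit order of the recursive version is preserved (irrelevant
--     to the resulting set, but keeps the traversal a faithful DFS).
--     """
--     install_this = set()
--     stack = [("target", t) for t in reversed(list_to_install)]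
--     while stack:
--         kind, name = stack.pop()
--         if kind == "add":
--             install_this.add(name)
--             continue
--         deps = INSTALL_LISTS.get(name)
--         if deps is None:
--             continue
--         if len(deps) == 1:
--             install_this.add(deps[0])
--         else:
--             for dep in reversed(deps):
--                 stack.append(("add", dep) if dep == name else ("target", dep))
--     return install_this
-- ===== Notes on version B (the rewrite author's own statement) =====
-- stated objective: alternative
-- what changed: Replaces the nested recursive helper (closure mutating the set) by an explicit iterative worklist: a tagged DFS stack whose items either add a name directly or expand a target via INSTALL_LISTS.
import Mathlib
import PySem

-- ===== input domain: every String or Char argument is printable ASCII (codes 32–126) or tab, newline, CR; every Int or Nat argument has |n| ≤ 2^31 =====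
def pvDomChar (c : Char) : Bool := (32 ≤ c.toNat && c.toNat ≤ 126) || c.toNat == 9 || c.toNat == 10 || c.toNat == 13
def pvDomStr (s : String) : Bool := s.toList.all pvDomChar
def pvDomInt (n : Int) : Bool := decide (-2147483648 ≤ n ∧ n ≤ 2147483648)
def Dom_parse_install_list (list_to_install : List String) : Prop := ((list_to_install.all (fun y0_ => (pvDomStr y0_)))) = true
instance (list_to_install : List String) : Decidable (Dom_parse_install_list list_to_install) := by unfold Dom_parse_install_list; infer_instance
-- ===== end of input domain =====

-- B replaces A's nested recursive helper by an explicit iterative worklist (tagged DFS stack); alternative decomposition, same cost.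

-- ===== PORT A =====
def INSTALL_LISTS : PySem.Dict String (List String) := PySem.Dict.ofList [
  ("bash", ["sh", "bash"]),
  ("bin", ["bin"]),
  ("cargo", ["cargo"]),
  ("curl", ["curl"]),
  ("git", ["git"]),
  ("gpg", ["gpg"]),
  ("less", ["less"]),
  ("pdb", ["pdb"]),
  ("pdbpp", ["pdbpp"]),
  ("pip", ["pip"]),
  ("poetry", ["poetry"]),
  ("sh", ["sh"]),
  ("starship", ["bash", "starship"]),
  ("wget", ["wget"]),
  ("default", ["bash", "bin", "curl", "less", "wget"]),
  ("prompt", ["starship"]),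
  ("coding", ["cargo", "git", "gpg", "pdb", "pdbpp", "pip", "poetry"])]

-- A's `parse_target_recursive`, with a fuel parameter only to make the recursion
-- structural; fuel 4 exceeds the maximal recursion depth (3) reachable through the
-- fixed table, so the computation is identical to Python's on every input.
def parseTargetRecursive : Nat → PySem.Set String → String → PySem.Set String
  | 0, install_this, _ => install_this
  | fuel + 1, install_this, target_to_install =>
    match INSTALL_LISTS.get? target_to_install with
    | none => install_this
    | some target =>
      if target.length = 1 then
        PySem.Set.add install_this (target.headD "")
      else
        target.foldl (fun s dependency =>
          if dependency == target_to_install then PySem.Set.add s dependency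
          else parseTargetRecursive fuel s dependency) install_this

def parse_install_list (list_to_install : List String) : List String :=
  list_to_install.foldl (fun s t => parseTargetRecursive 4 s t) PySem.Set.empty

-- ===== PORT B =====
-- Source B's while-loop; the Lean stack keeps its top at the head (Python pops/pushes at
-- the list's end — same LIFO order).  Fuel 8*|stack|+1 bounds the number of loop
-- iterations (proved sufficient below), making the loop structural.
def runWorklist : Nat → PySem.Set String → List (String × String) → PySem.Set String
  | _, install_this, [] => install_this
  | 0, install_this, _ => install_this
  | fuel + 1, install_this, (kind, name) :: stack =>
    if kind == "add" then runWorklist fuel (PySem.Set.add install_this name) stack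
    else
      match INSTALL_LISTS.get? name with
      | none => runWorklist fuel install_this stack
      | some deps =>
        if deps.length = 1 then
          runWorklist fuel (PySem.Set.add install_this (deps.headD "")) stack
        else
          runWorklist fuel install_this
            ((deps.reverse.map (fun dep =>
              if dep == name then ("add", dep) else ("target", dep))).reverse ++ stack)

def parse_install_list_alt (list_to_install : List String) : List String :=
  runWorklist (8 * list_to_install.length + 1) PySem.Set.empty
    (list_to_install.map (fun t => ("target", t)))

-- ===== PRECONDITION & SPEC =====
def Spec_parse_install_list (list_to_install : List String) (out : List String) : Prop := out = parse_install_list_alt list_to_install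
instance (list_to_install : List String) (out : List String) : Decidable (Spec_parse_install_list list_to_install out) := by unfold Spec_parse_install_list; infer_instance

-- ===== CLAIM (what is proved, stated in full; the proofs are below) =====
def Claim_equal_parse_install_list : Prop := ∀ (list_to_install : List String), Dom_parse_install_list list_to_install → Spec_parse_install_list list_to_install (parse_install_list list_to_install)

-- ===== LEMMAS AND PROOFS =====

-- the sequence of names a single target contributes, in insertion order
def expand (t : String) : List String :=
  if t = "bash" then ["sh", "bash"]
  else if t = "starship" then ["sh", "bash", "starship"]
  else if t = "default" then ["sh", "bash", "bin", "curl", "less", "wget"]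
  else if t = "coding" then ["cargo", "git", "gpg", "pdb", "pdbpp", "pip", "poetry"]
  else if t = "prompt" then ["starship"]
  else if t ∈ ["bin", "cargo", "curl", "git", "gpg", "less", "pdb", "pdbpp",
               "pip", "poetry", "sh", "wget"] then [t]
  else []

def itemExpand (p : String × String) : List String :=
  if p.1 == "add" then [p.2] else expand p.2

-- fuel weight of a stack item / stack
def wTarget (t : String) : Nat :=
  if t = "bash" then 3 else if t = "starship" then 5
  else if t = "default" then 8 else if t = "coding" then 8 else 1

def wItem (p : String × String) : Nat := if p.1 == "add" then 1 else wTarget p.2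

def wStack (stack : List (String × String)) : Nat := (stack.map wItem).sum

theorem get?_eq_none_of_notkey (t : String)
    (h : t ∉ ["bash", "bin", "cargo", "curl", "git", "gpg", "less", "pdb", "pdbpp",
      "pip", "poetry", "sh", "starship", "wget", "default", "prompt", "coding"]) :
    INSTALL_LISTS.get? t = none := by
  have hm : INSTALL_LISTS = PySem.Dict.mk [
    ("bash", ["sh", "bash"]), ("bin", ["bin"]), ("cargo", ["cargo"]), ("curl", ["curl"]),
    ("git", ["git"]), ("gpg", ["gpg"]), ("less", ["less"]), ("pdb", ["pdb"]),
    ("pdbpp", ["pdbpp"]), ("pip", ["pip"]), ("poetry", ["poetry"]), ("sh", ["sh"]),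
    ("starship", ["bash", "starship"]), ("wget", ["wget"]),
    ("default", ["bash", "bin", "curl", "less", "wget"]), ("prompt", ["starship"]),
    ("coding", ["cargo", "git", "gpg", "pdb", "pdbpp", "pip", "poetry"])] := by rfl
  simp only [List.mem_cons, not_or] at h
  obtain ⟨h1, h2, h3, h4, h5, h6, h7, h8, h9, h10, h11, h12, h13, h14, h15, h16, h17, -⟩ := h
  simp [hm, PySem.Dict.get?_mk_cons, PySem.Dict.get?, beq_iff_eq,
    Ne.symm h1, Ne.symm h2, Ne.symm h3, Ne.symm h4, Ne.symm h5, Ne.symm h6, Ne.symm h7,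
    Ne.symm h8, Ne.symm h9, Ne.symm h10, Ne.symm h11, Ne.symm h12, Ne.symm h13,
    Ne.symm h14, Ne.symm h15, Ne.symm h16, Ne.symm h17]

theorem recA_eq_update (s : PySem.Set String) (t : String) :
    parseTargetRecursive 4 s t = PySem.Set.update s (expand t) := by
  by_cases h1 : t = "bash"; · subst h1; rfl
  by_cases h2 : t = "bin"; · subst h2; rfl
  by_cases h3 : t = "cargo"; · subst h3; rfl
  by_cases h4 : t = "curl"; · subst h4; rfl
  by_cases h5 : t = "git"; · subst h5; rfl
  by_cases h6 : t = "gpg"; · subst h6; rfl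
  by_cases h7 : t = "less"; · subst h7; rfl
  by_cases h8 : t = "pdb"; · subst h8; rfl
  by_cases h9 : t = "pdbpp"; · subst h9; rfl
  by_cases h10 : t = "pip"; · subst h10; rfl
  by_cases h11 : t = "poetry"; · subst h11; rfl
  by_cases h12 : t = "sh"; · subst h12; rfl
  by_cases h13 : t = "starship"; · subst h13; rfl
  by_cases h14 : t = "wget"; · subst h14; rfl
  by_cases h15 : t = "default"; · subst h15; rfl
  by_cases h16 : t = "prompt"; · subst h16; rfl
  by_cases h17 : t = "coding"; · subst h17; rfl
  have hnone : INSTALL_LISTS.get? t = none := by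
    apply get?_eq_none_of_notkey
    simp [h1, h2, h3, h4, h5, h6, h7, h8, h9, h10, h11, h12, h13, h14, h15, h16, h17]
  have hexp : expand t = [] := by
    simp [expand, h1, h2, h3, h4, h5, h6, h7, h8, h9, h10, h11, h12, h13, h14, h15, h16, h17]
  simp [parseTargetRecursive, hnone, hexp, PySem.Set.update]

theorem parseA_eq (l : List String) :
    parse_install_list l = PySem.Set.update PySem.Set.empty (l.flatMap expand) := by
  unfold parse_install_list
  induction l using List.reverseRecOn with
  | nil => rfl
  | append_singleton l t ih =>
      rw [List.foldl_append, List.flatMap_append]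
      simp only [List.foldl_cons, List.foldl_nil, List.flatMap_cons, List.flatMap_nil,
        List.append_nil]
      rw [ih, recA_eq_update, PySem.Set.update_append]

-- B's loop computes the update by the flattened stack, given enough fuel
theorem wTarget_pos (t : String) : 1 ≤ wTarget t := by
  unfold wTarget; split_ifs <;> omega

theorem wTarget_le (t : String) : wTarget t ≤ 8 := by
  unfold wTarget; split_ifs <;> omega

theorem runWorklist_eq (f : Nat) :
    ∀ (s : PySem.Set String) (stack : List (String × String)), wStack stack < f →
      runWorklist f s stack = PySem.Set.update s (stack.flatMap itemExpand) := by
  induction f with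
  | zero => intro s stack h; omega
  | succ f ih =>
    intro s stack h
    match stack with
    | [] => simp [runWorklist, PySem.Set.update]
    | (kind, name) :: rest =>
      by_cases hk : kind = "add"
      · subst hk
        have hw : wStack rest < f := by
          simp [wStack, wItem] at h ⊢; omega
        simp only [runWorklist, beq_self_eq_true, if_pos]
        rw [ih _ _ hw]
        simp [itemExpand, PySem.Set.update_cons]
      · have hkb : (kind == "add") = false := by simp [hk]
        have hw0 : wStack ((kind, name) :: rest) = wTarget name + wStack rest := by
          simp [wStack, wItem, hkb]
        by_cases h1 : name = "bash"
        · subst h1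
          simp only [runWorklist, hkb, Bool.false_eq_true]
          rw [show (match INSTALL_LISTS.get? "bash" with
                | none => runWorklist f s rest
                | some deps =>
                  if deps.length = 1 then runWorklist f (PySem.Set.add s (deps.headD "")) rest
                  else runWorklist f s ((deps.reverse.map (fun dep =>
                    if dep == "bash" then ("add", dep) else ("target", dep))).reverse ++ rest)) =
              runWorklist f s ([("target", "sh"), ("add", "bash")] ++ rest) from by
            simp [show INSTALL_LISTS.get? "bash" = some ["sh", "bash"] from rfl]]
          have hw' : wStack ([("target", "sh"), ("add", "bash")] ++ rest) < f := by
            simp [wStack, wItem, wTarget, hkb] at h ⊢; omega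
          rw [ih _ _ hw']
          simp [itemExpand, expand, hk, PySem.Set.update_append]
        · by_cases h2 : name = "starship"
          · subst h2
            simp only [runWorklist, hkb, Bool.false_eq_true]
            rw [show (match INSTALL_LISTS.get? "starship" with
                  | none => runWorklist f s rest
                  | some deps =>
                    if deps.length = 1 then runWorklist f (PySem.Set.add s (deps.headD "")) rest
                    else runWorklist f s ((deps.reverse.map (fun dep =>
                      if dep == "starship" then ("add", dep) else ("target", dep))).reverse ++ rest)) =
                runWorklist f s ([("target", "bash"), ("add", "starship")] ++ rest) from by
              simp [show INSTALL_LISTS.get? "starship" = some ["bash", "starship"] from rfl]]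
            have hw' : wStack ([("target", "bash"), ("add", "starship")] ++ rest) < f := by
              simp [wStack, wItem, wTarget, hkb] at h ⊢; omega
            rw [ih _ _ hw']
            simp [itemExpand, expand, hk, PySem.Set.update_append]
          · by_cases h3 : name = "default"
            · subst h3
              simp only [runWorklist, hkb, Bool.false_eq_true]
              rw [show (match INSTALL_LISTS.get? "default" with
                    | none => runWorklist f s rest
                    | some deps =>
                      if deps.length = 1 then runWorklist f (PySem.Set.add s (deps.headD "")) rest
                      else runWorklist f s ((deps.reverse.map (fun dep =>
                        if dep == "default" then ("add", dep) else ("target", dep))).reverse ++ rest)) =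
                  runWorklist f s ([("target", "bash"), ("target", "bin"), ("target", "curl"), ("target", "less"), ("target", "wget")] ++ rest) from by
                simp [show INSTALL_LISTS.get? "default" = some ["bash", "bin", "curl", "less", "wget"] from rfl]]
              have hw' : wStack ([("target", "bash"), ("target", "bin"), ("target", "curl"), ("target", "less"), ("target", "wget")] ++ rest) < f := by
                simp [wStack, wItem, wTarget, hkb] at h ⊢; omega
              rw [ih _ _ hw']
              simp [itemExpand, expand, hk, PySem.Set.update_append]
            · by_cases h4 : name = "coding"
              · subst h4
                simp only [runWorklist, hkb, Bool.false_eq_true]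
                rw [show (match INSTALL_LISTS.get? "coding" with
                      | none => runWorklist f s rest
                      | some deps =>
                        if deps.length = 1 then runWorklist f (PySem.Set.add s (deps.headD "")) rest
                        else runWorklist f s ((deps.reverse.map (fun dep =>
                          if dep == "coding" then ("add", dep) else ("target", dep))).reverse ++ rest)) =
                    runWorklist f s ([("target", "cargo"), ("target", "git"), ("target", "gpg"), ("target", "pdb"), ("target", "pdbpp"), ("target", "pip"), ("target", "poetry")] ++ rest) from by
                  simp [show INSTALL_LISTS.get? "coding" = some ["cargo", "git", "gpg", "pdb", "pdbpp", "pip", "poetry"] from rfl]]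
                have hw' : wStack ([("target", "cargo"), ("target", "git"), ("target", "gpg"), ("target", "pdb"), ("target", "pdbpp"), ("target", "pip"), ("target", "poetry")] ++ rest) < f := by
                  simp [wStack, wItem, wTarget, hkb] at h ⊢; omega
                rw [ih _ _ hw']
                simp [itemExpand, expand, hk, PySem.Set.update_append]
              · -- name is "prompt", a singleton key, or not a key at all
                have hw : wStack rest < f := by have := wTarget_pos name; rw [hw0] at h; omega
                by_cases h5 : name = "prompt"
                · subst h5
                  have hstep : runWorklist (f + 1) s ((kind, "prompt") :: rest) =
                      runWorklist f (PySem.Set.add s "starship") rest := by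
                    simp [runWorklist, hkb, show INSTALL_LISTS.get? "prompt" = some ["starship"] from rfl]
                  rw [hstep, ih _ _ hw]
                  simp [itemExpand, expand, hk, PySem.Set.update_cons]
                · by_cases hkey : name ∈ ["bin", "cargo", "curl", "git", "gpg", "less",
                      "pdb", "pdbpp", "pip", "poetry", "sh", "wget"]
                  · have hget : INSTALL_LISTS.get? name = some [name] := by
                      fin_cases hkey <;> rfl
                    have hstep : runWorklist (f + 1) s ((kind, name) :: rest) =
                        runWorklist f (PySem.Set.add s name) rest := by
                      simp [runWorklist, hkb, hget]
                    rw [hstep, ih _ _ hw]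
                    have hexp : expand name = [name] := by
                      fin_cases hkey <;> rfl
                    simp [itemExpand, hexp, hk, PySem.Set.update_cons]
                  · simp only [List.mem_cons, List.mem_singleton, not_or] at hkey
                    obtain ⟨k1, k2, k3, k4, k5, k6, k7, k8, k9, k10, k11, k12⟩ := hkey
                    have hget : INSTALL_LISTS.get? name = none := by
                      apply get?_eq_none_of_notkey
                      simp [h1, h2, h3, h4, h5, k1, k2, k3, k4, k5, k6, k7, k8, k9, k10, k11, k12]
                    have hstep : runWorklist (f + 1) s ((kind, name) :: rest) =
                        runWorklist f s rest := by
                      simp [runWorklist, hkb, hget]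
                    rw [hstep, ih _ _ hw]
                    have hexp : expand name = [] := by
                      simp [expand, h1, h2, h3, h4, h5, k1, k2, k3, k4, k5, k6, k7, k8, k9, k10, k11, k12]
                    simp [itemExpand, hexp, hk]

theorem wStack_map_le (l : List String) :
    wStack (l.map (fun t => ("target", t))) ≤ 8 * l.length := by
  induction l with
  | nil => simp [wStack]
  | cons t l ih =>
    have := wTarget_le t
    simp [wStack, wItem] at ih ⊢
    omega

theorem parseB_eq (l : List String) :
    parse_install_list_alt l = PySem.Set.update PySem.Set.empty (l.flatMap expand) := by
  unfold parse_install_list_alt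
  rw [runWorklist_eq _ _ _ (by have := wStack_map_le l; omega)]
  congr 1
  induction l with
  | nil => rfl
  | cons t l ih => simp [itemExpand] at ih ⊢; exact ih

-- ===== VERDICT (by name: the statement is the Claim_ definition above) =====
theorem parse_install_list_spec : Claim_equal_parse_install_list := by
  intro l _
  unfold Spec_parse_install_list
  rw [parseA_eq, parseB_eq]
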